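-- pv_equiv track=rewrite | github.com/filipov73/python_advanced_january_2020 | Exam/Python Advanced Exam - 23 February 2020/2.py | start_position
-- ===== SOURCE A (Python) =====
-- def start_position(matrix):
--     length = len(matrix[0])
--     position = []
--     count = 0
--     for row_idx in range(length):
--         for column_idx in range(length):
--             if matrix[row_idx][column_idx] == "p":
--                 position = [row_idx, column_idx]
--             if matrix[row_idx][column_idx] == "t":
--                 count += 1
--     return position, count
-- ===== SOURCE B (Python) =====
-- def start_position(matrix):
--     length = len(matrix[0])
--     count = sum(1 for r in range(length) for c in range(length) if matrix[r][c] == "t")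
--     for r in reversed(range(length)):
--         for c in reversed(range(length)):
--             if matrix[r][c] == "p":
--                 return [r, c], count
--     return [], count
-- ===== Notes on version B (the rewrite author's own statement) =====
-- stated objective: alternative
-- what changed: Replaces the single double loop that keeps overwriting the position with a one-line generator sum for the 't' count plus a reverse-order scan that early-exits at the first 'p' found (= the last 'p' in row-major order).
import Mathlib
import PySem

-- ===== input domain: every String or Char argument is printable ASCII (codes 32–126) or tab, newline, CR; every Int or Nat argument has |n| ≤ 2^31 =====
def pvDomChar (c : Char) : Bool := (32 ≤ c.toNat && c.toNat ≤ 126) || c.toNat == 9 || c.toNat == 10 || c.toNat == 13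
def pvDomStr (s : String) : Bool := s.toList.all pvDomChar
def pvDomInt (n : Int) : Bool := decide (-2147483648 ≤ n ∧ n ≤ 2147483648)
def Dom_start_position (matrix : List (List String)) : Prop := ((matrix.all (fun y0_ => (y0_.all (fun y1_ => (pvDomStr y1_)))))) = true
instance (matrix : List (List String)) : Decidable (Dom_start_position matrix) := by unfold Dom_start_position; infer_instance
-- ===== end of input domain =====

-- B replaces A's single sweeping double loop (which keeps overwriting `position`) by a
-- generator-sum for the 't' count plus a reverse-order scan that stops at the first 'p'
-- (= A's last 'p'); same cost, different decomposition (objective: alternative).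

-- ===== PORT A =====
def start_position (matrix : List (List String)) : List Int × Int :=
  let length : Int := (PySem.List.pyGetD matrix 0 []).length
  (PySem.List.pyRange 0 length 1).foldl (fun (st : List Int × Int) row_idx =>
    (PySem.List.pyRange 0 length 1).foldl (fun (st : List Int × Int) column_idx =>
      let cell := PySem.List.pyGetD (PySem.List.pyGetD matrix row_idx []) column_idx ""
      let st := if cell == "p" then ([row_idx, column_idx], st.2) else st
      if cell == "t" then (st.1, st.2 + 1) else st) st) ([], 0)

-- ===== PORT B =====
-- sum(1 for r in range(length) for c in range(length) if matrix[r][c] == "t")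
def countT_alt (matrix : List (List String)) (length : Int) : Int :=
  (PySem.List.pyRange 0 length 1).foldl (fun acc r =>
    (PySem.List.pyRange 0 length 1).foldl (fun acc c =>
      if PySem.List.pyGetD (PySem.List.pyGetD matrix r []) c "" == "t" then acc + 1 else acc) acc) 0

def start_position_alt (matrix : List (List String)) : List Int × Int :=
  let length : Int := (PySem.List.pyGetD matrix 0 []).length
  let count := countT_alt matrix length
  -- for r in reversed(range(length)): for c in reversed(range(length)): if … == "p": return [r, c], count
  match (PySem.List.pyRange 0 length 1).reverse.findSome? (fun r =>
        (PySem.List.pyRange 0 length 1).reverse.findSome? (fun c =>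
          if PySem.List.pyGetD (PySem.List.pyGetD matrix r []) c "" == "p" then
            some [r, c] else none)) with
  | some pos => (pos, count)
  | none => ([], count)

-- ===== PRECONDITION & SPEC =====
-- Pre_ excludes exactly the inputs on which Python A raises IndexError: the empty matrix,
-- and matrices with fewer than len(matrix[0]) rows or a row among the first len(matrix[0])
-- shorter than len(matrix[0]).
def Pre_start_position (matrix : List (List String)) : Prop :=
  matrix ≠ [] ∧ (matrix.headD []).length ≤ matrix.length ∧
    ∀ row ∈ matrix.take (matrix.headD []).length, (matrix.headD []).length ≤ row.length
instance (matrix : List (List String)) : Decidable (Pre_start_position matrix) := by unfold Pre_start_position; infer_instance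

def pvWitness_start_position : List (List String) := [["p", "t"], ["t", "x"]]

def Spec_start_position (matrix : List (List String)) (out : List Int × Int) : Prop := out = start_position_alt matrix
instance (matrix : List (List String)) (out : List Int × Int) : Decidable (Spec_start_position matrix out) := by unfold Spec_start_position; infer_instance

-- ===== CLAIM (what is proved, stated in full; the proofs are below) =====
def Claim_equal_start_position : Prop := ∀ (matrix : List (List String)), Dom_start_position matrix → Pre_start_position matrix → Spec_start_position matrix (start_position matrix)

-- ===== LEMMAS AND PROOFS =====

-- a fold whose step is "(h r).getD acc" computes the last hit, i.e. the first hit of the reversed list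
theorem foldl_getD_reverse_findSome? {α β : Type} (h : α → Option β) (rs : List α) (acc : β) :
    rs.foldl (fun a r => (h r).getD a) acc = (rs.reverse.findSome? h).getD acc := by
  induction rs generalizing acc with
  | nil => rfl
  | cons r rs ih =>
      simp only [List.foldl_cons, List.reverse_cons, List.findSome?_append, ih]
      cases rs.reverse.findSome? h with
      | none => cases hr : h r <;> simp [List.findSome?, hr]
      | some b => rfl

-- a fold over a pair whose components are updated independently splits into two folds
theorem foldl_prod_split {α β γ : Type} (f1 : β → α → β) (f2 : γ → α → γ) (l : List α)
    (a : β) (b : γ) :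
    l.foldl (fun st x => (f1 st.1 x, f2 st.2 x)) (a, b) = (l.foldl f1 a, l.foldl f2 b) := by
  induction l generalizing a b with
  | nil => rfl
  | cons x l ih => simp [List.foldl_cons, ih]

-- A's double sweep, over an abstract cell accessor, equals (last-p-via-reverse-first, t-count)
theorem sweep_eq_find_count (get : Int → Int → String) (l : List Int) :
    l.foldl (fun (st : List Int × Int) r =>
      l.foldl (fun (st : List Int × Int) c =>
        let cell := get r c
        let st := if cell == "p" then ([r, c], st.2) else st
        if cell == "t" then (st.1, st.2 + 1) else st) st) ([], 0)
    = ((l.reverse.findSome? (fun r => l.reverse.findSome? (fun c =>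
          if get r c == "p" then some [r, c] else none))).getD [],
       l.foldl (fun acc r => l.foldl (fun acc c =>
          if get r c == "t" then acc + 1 else acc) acc) 0) := by
  have hinner : ∀ (r : Int),
      (fun (st : List Int × Int) (c : Int) =>
        let cell := get r c
        let st := if cell == "p" then ([r, c], st.2) else st
        if cell == "t" then (st.1, st.2 + 1) else st)
      = (fun (st : List Int × Int) (c : Int) =>
          ((if get r c == "p" then some [r, c] else none).getD st.1,
           if get r c == "t" then st.2 + 1 else st.2)) := by
    intro r; funext st c
    by_cases hp : get r c == "p" <;> by_cases ht : get r c == "t" <;> simp [hp, ht]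
  have houter :
      (fun (st : List Int × Int) (r : Int) =>
        l.foldl (fun (st : List Int × Int) (c : Int) =>
          let cell := get r c
          let st := if cell == "p" then ([r, c], st.2) else st
          if cell == "t" then (st.1, st.2 + 1) else st) st)
      = (fun (st : List Int × Int) (r : Int) =>
          (((fun r => l.reverse.findSome? (fun c =>
              if get r c == "p" then some [r, c] else none)) r).getD st.1,
           l.foldl (fun acc c => if get r c == "t" then acc + 1 else acc) st.2)) := by
    funext st r
    rw [hinner r]
    obtain ⟨a, b⟩ := st
    rw [foldl_prod_split (fun a c => (if get r c == "p" then some [r, c] else none).getD a)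
          (fun b c => if get r c == "t" then b + 1 else b)]
    rw [foldl_getD_reverse_findSome?]
  rw [houter]
  rw [foldl_prod_split
        (fun a r => ((fun r => l.reverse.findSome? (fun c =>
          if get r c == "p" then some [r, c] else none)) r).getD a)
        (fun b r => l.foldl (fun acc c => if get r c == "t" then acc + 1 else acc) b)]
  rw [foldl_getD_reverse_findSome?]

-- B's "early return" match written as Option.getD
theorem match_eq_getD (o : Option (List Int)) (c : Int) :
    (match o with | some pos => (pos, c) | none => ([], c)) = (o.getD [], c) := by
  cases o <;> rfl

theorem start_position_eq_alt (matrix : List (List String)) :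
    start_position matrix = start_position_alt matrix := by
  have h1 :
      start_position matrix
      = (((PySem.List.pyRange 0 ((PySem.List.pyGetD matrix 0 []).length : Int) 1).reverse.findSome?
            (fun r => (PySem.List.pyRange 0 ((PySem.List.pyGetD matrix 0 []).length : Int) 1).reverse.findSome?
              (fun c => if PySem.List.pyGetD (PySem.List.pyGetD matrix r []) c "" == "p" then
                some [r, c] else none))).getD [],
         countT_alt matrix ((PySem.List.pyGetD matrix 0 []).length : Int)) :=
    sweep_eq_find_count (fun r c => PySem.List.pyGetD (PySem.List.pyGetD matrix r []) c "")
      (PySem.List.pyRange 0 ((PySem.List.pyGetD matrix 0 []).length : Int) 1)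
  have h2 :
      start_position_alt matrix
      = (((PySem.List.pyRange 0 ((PySem.List.pyGetD matrix 0 []).length : Int) 1).reverse.findSome?
            (fun r => (PySem.List.pyRange 0 ((PySem.List.pyGetD matrix 0 []).length : Int) 1).reverse.findSome?
              (fun c => if PySem.List.pyGetD (PySem.List.pyGetD matrix r []) c "" == "p" then
                some [r, c] else none))).getD [],
         countT_alt matrix ((PySem.List.pyGetD matrix 0 []).length : Int)) :=
    match_eq_getD _ _
  rw [h1, h2]

-- ===== VERDICT (by name: the statement is the Claim_ definition above) =====
theorem start_position_spec : Claim_equal_start_position := by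
  intro matrix _ _
  unfold Spec_start_position
  exact start_position_eq_alt matrix
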